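-- pv_equiv track=rewrite | github.com/JohnHowardRoark/thinkcspy3 | chapter_07/ch07ex14.py | num_digits
-- ===== SOURCE A (Python) =====
-- def num_digits(n):
--     """ Exercise 14: Modify num_digits so 0 returns 1 and negative numbers
--         work.
--     """
--     if n == 0:
--         return 1
--     count = 0
--     while n != 0:
--         count = count + 1
--         n = abs(n // 10)
--     return count
-- ===== SOURCE B (Python) =====
-- def num_digits(n):
--     return len(str(abs(n)))
-- ===== Notes on version B (the rewrite author's own statement) =====
-- stated objective: idiomatic
-- what changed: Replaces the division-counting while loop by the single expression len(str(abs(n))), reading the digit count off the decimal string.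
-- intended difference: On negative n whose absolute value lies in [10^k-9, 10^k-1] for some k>=1 (e.g. -5, -99, -999), A's abs(n//10) step rounds |n| up across a power of ten and A returns one more than the true decimal digit count (num_digits(-5)==2), while B returns the true digit count there, which is what the exercise ('make negative numbers work') intends. — e.g. on num_digits(-5): A returns 2, B returns 1
import Mathlib
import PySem

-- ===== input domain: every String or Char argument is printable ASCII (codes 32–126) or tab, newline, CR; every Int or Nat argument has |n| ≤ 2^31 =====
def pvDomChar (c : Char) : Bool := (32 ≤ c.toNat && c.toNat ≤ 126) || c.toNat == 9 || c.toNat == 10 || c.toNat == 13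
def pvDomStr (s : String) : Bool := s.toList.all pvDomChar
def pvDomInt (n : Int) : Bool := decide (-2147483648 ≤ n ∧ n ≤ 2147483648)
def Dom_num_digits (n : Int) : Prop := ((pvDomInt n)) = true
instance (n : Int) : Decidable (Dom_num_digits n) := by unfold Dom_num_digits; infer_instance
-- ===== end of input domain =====

-- B replaces A's division-counting while loop by the single idiomatic expression
-- len(str(abs(n))); A over-counts some negatives (see D_num_digits below), B returns the true digit count there.


-- ===== PORT A =====
-- Python's n // 10 with the positive literal divisor 10 (cited by the port's termination proof)
theorem floordiv_ten (a : Int) : PySem.Int.floordiv a 10 = a / 10 := by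
  simp [PySem.Int.floordiv, Int.fdiv_eq_ediv]

-- while n != 0: count = count + 1; n = abs(n // 10)
def numDigitsLoop (n : Int) (count : Int) : Int :=
  if n = 0 then count
  else numDigitsLoop |PySem.Int.floordiv n 10| (count + 1)
termination_by (2 * n.natAbs + (if n < 0 then 1 else 0) : Nat)
decreasing_by
  rw [floordiv_ten]
  rw [if_neg (not_lt.mpr (abs_nonneg _)), Int.natAbs_abs]
  split_ifs <;> omega

def num_digits (n : Int) : Int :=
  if n = 0 then 1
  else numDigitsLoop n 0

-- ===== PORT B =====
-- return len(str(abs(n)))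
def num_digits_alt (n : Int) : Int :=
  PySem.Str.len (PySem.Int.toStr |n|)

-- ===== PRECONDITION & SPEC =====
-- On negative n with |n| in [10^k-9, 10^k-1] for some k ≥ 1 (e.g. -5, -99, -999), A's
-- n = abs(n // 10) step rounds |n| up across a power of ten, so A returns one more than the
-- number of decimal digits; B returns the true digit count, which the exercise
-- ("make negative numbers work") intends.
def D_num_digits (n : Int) : Prop :=
  n < 0 ∧ ∃ k ∈ Finset.Icc 1 10, 10 ^ k - 9 ≤ n.natAbs ∧ n.natAbs ≤ 10 ^ k - 1
instance (n : Int) : Decidable (D_num_digits n) := by unfold D_num_digits; infer_instance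

def Spec_num_digits (n : Int) (out : Int) : Prop := ¬ D_num_digits n → out = num_digits_alt n
instance (n : Int) (out : Int) : Decidable (Spec_num_digits n out) := by unfold Spec_num_digits; infer_instance

def pvDiffWitness_num_digits : Int := -5
def pvDiffWitnessOut_num_digits : Int × Int := (2, 1)

-- ===== CLAIM (what is proved, stated in full; the proofs are below) =====
def Claim_unchanged_num_digits : Prop := ∀ (n : Int), Dom_num_digits n → Spec_num_digits n (num_digits n)
def Claim_changed_num_digits : Prop := Dom_num_digits (pvDiffWitness_num_digits) ∧ D_num_digits (pvDiffWitness_num_digits) ∧ num_digits (pvDiffWitness_num_digits) = pvDiffWitnessOut_num_digits.1 ∧ num_digits_alt (pvDiffWitness_num_digits) = pvDiffWitnessOut_num_digits.2 ∧ pvDiffWitnessOut_num_digits.1 ≠ pvDiffWitnessOut_num_digits.2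
def Claim_exact_num_digits : Prop := ∀ (n : Int), Dom_num_digits n → D_num_digits n → num_digits n ≠ num_digits_alt n

-- ===== LEMMAS AND PROOFS =====

-- number of decimal digits, written as the obvious recursion (proof-side helper)
def dlen (m : Nat) : Nat :=
  if m < 10 then 1 else dlen (m / 10) + 1
decreasing_by omega

theorem dlen_small {m : Nat} (h : m < 10) : dlen m = 1 := by
  rw [dlen]; simp [h]

theorem dlen_step {m : Nat} (h : 10 ≤ m) : dlen m = dlen (m / 10) + 1 := by
  rw [dlen]; simp [Nat.not_lt.mpr h]

-- characterization: d+1 digits exactly on [10^d, 10^(d+1))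
theorem dlen_char : ∀ (d m : Nat), 10 ^ d ≤ m → m < 10 ^ (d + 1) → dlen m = d + 1 := by
  intro d
  induction d with
  | zero => intro m h1 h2; exact dlen_small (by simpa using h2)
  | succ d ih =>
    intro m h1 h2
    have hp : 10 ≤ (10:Nat) ^ (d + 1) := by
      calc (10:Nat) = 10 ^ 1 := by norm_num
      _ ≤ 10 ^ (d + 1) := Nat.pow_le_pow_right (by norm_num) (by omega)
    have h10 : 10 ≤ m := le_trans hp h1
    rw [dlen_step h10]
    have hlo : 10 ^ d ≤ m / 10 := by
      have he : (10:Nat) ^ (d + 1) = 10 ^ d * 10 := by ring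
      rw [he] at h1
      omega
    have hhi : m / 10 < 10 ^ (d + 1) := by
      have he : (10:Nat) ^ (d + 1 + 1) = 10 ^ (d + 1) * 10 := by ring
      rw [he] at h2
      omega
    rw [ih (m / 10) hlo hhi]

theorem dlen_eq_log {m : Nat} (h : 1 ≤ m) : dlen m = Nat.log 10 m + 1 :=
  dlen_char (Nat.log 10 m) m (Nat.pow_log_le_self 10 (by omega))
    (Nat.lt_pow_succ_log_self (by norm_num) m)

theorem dlen_pow (k : Nat) : dlen (10 ^ k) = k + 1 :=
  dlen_char k _ (le_refl _)
    (by have he : (10:Nat) ^ (k + 1) = 10 ^ k * 10 := by ring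
        rw [he]
        have hp : 0 < (10:Nat) ^ k := Nat.pow_pos (by norm_num)
        omega)

-- dlen needs at most m + 1 units of fuel
theorem dlen_le_succ : ∀ (m : Nat), dlen m ≤ m + 1 := by
  intro m
  induction m using Nat.strong_induction_on with
  | _ m ih =>
    by_cases h : m < 10
    · rw [dlen_small h]; omega
    · rw [dlen_step (by omega)]
      have hlt : m / 10 < m := Nat.div_lt_self (by omega) (by norm_num)
      have := ih (m / 10) hlt
      omega

-- Nat.toDigitsCore produces dlen-many characters when fuel suffices
theorem toDigitsCore_len : ∀ (f m : Nat) (acc : List Char), dlen m ≤ f →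
    (Nat.toDigitsCore 10 f m acc).length = dlen m + acc.length := by
  intro f
  induction f with
  | zero =>
    intro m acc h
    exfalso
    have h1 : 1 ≤ dlen m := by
      by_cases hm : m < 10
      · rw [dlen_small hm]
      · rw [dlen_step (by omega)]; omega
    omega
  | succ f ih =>
    intro m acc h
    simp only [Nat.toDigitsCore]
    by_cases hz : m / 10 = 0
    · have hm : m < 10 := by omega
      rw [if_pos hz, dlen_small hm]
      simp
      omega
    · rw [if_neg hz]
      have hm : 10 ≤ m := by
        by_contra hc
        exact hz (Nat.div_eq_of_lt (by omega))
      have hfuel : dlen (m / 10) ≤ f := by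
        rw [dlen_step hm] at h; omega
      rw [ih (m / 10) _ hfuel, dlen_step hm]
      simp [List.length]
      omega

theorem toDigits_len (m : Nat) : (Nat.toDigits 10 m).length = dlen m := by
  unfold Nat.toDigits
  rw [toDigitsCore_len (m + 1) m [] (dlen_le_succ m)]
  simp

-- B's port computes dlen of |n|
theorem alt_eq (n : Int) : num_digits_alt n = (dlen n.natAbs : Int) := by
  unfold num_digits_alt
  rw [PySem.Str.len_eq]
  unfold PySem.Int.toStr PySem.Int.toChars
  rw [if_neg (not_lt.mpr (abs_nonneg n))]
  rw [Int.abs_eq_natAbs, Int.toNat_natCast]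
  simp [toDigits_len]

-- A's loop on a positive argument counts dlen digits
theorem loop_pos : ∀ (m : Nat), 1 ≤ m → ∀ (count : Int),
    numDigitsLoop (m : Int) count = count + (dlen m : Int) := by
  intro m
  induction m using Nat.strong_induction_on with
  | _ m ih =>
    intro hm count
    rw [numDigitsLoop.eq_def]
    have hne : ¬ ((m : Int) = 0) := by omega
    rw [if_neg hne]
    have hdiv : |PySem.Int.floordiv (m : Int) 10| = ((m / 10 : Nat) : Int) := by
      rw [floordiv_ten]
      have he : ((m : Int)) / 10 = ((m / 10 : Nat) : Int) := by omega
      rw [he]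
      exact abs_of_nonneg (by positivity)
    rw [hdiv]
    by_cases h10 : m < 10
    · have hz : m / 10 = 0 := Nat.div_eq_of_lt h10
      rw [hz]
      rw [numDigitsLoop.eq_def]
      simp [dlen_small h10]
    · have hlt : m / 10 < m := Nat.div_lt_self (by omega) (by norm_num)
      have hpos : 1 ≤ m / 10 := by omega
      rw [ih (m / 10) hlt hpos (count + 1)]
      rw [show dlen m = dlen (m / 10) + 1 from dlen_step (by omega)]
      push_cast
      ring

-- A's first loop step on a negative argument: n becomes ceil(|n|/10) ≥ 1
theorem loop_neg (n : Int) (hn : n < 0) :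
    numDigitsLoop n 0 = 1 + (dlen ((n.natAbs + 9) / 10) : Int) := by
  rw [numDigitsLoop.eq_def]
  rw [if_neg (by omega)]
  have hdiv : |PySem.Int.floordiv n 10| = (((n.natAbs + 9) / 10 : Nat) : Int) := by
    rw [floordiv_ten]
    have h1 : n / 10 = -(((n.natAbs + 9) / 10 : Nat) : Int) := by omega
    rw [h1, abs_neg]
    exact abs_of_nonneg (by positivity)
  rw [hdiv]
  have hpos : 1 ≤ (n.natAbs + 9) / 10 := by omega
  rw [loop_pos _ hpos (0 + 1)]
  ring

-- inside D: A returns log+2 while B returns log+1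
theorem values_in_D {n : Int} (hD : D_num_digits n) :
    num_digits n = (Nat.log 10 n.natAbs : Int) + 2 ∧
    num_digits_alt n = (Nat.log 10 n.natAbs : Int) + 1 := by
  obtain ⟨hn, k, hk, hlo, hhi⟩ := hD
  simp only [Finset.mem_Icc] at hk
  set m := n.natAbs with hm
  have hm1 : 1 ≤ m := by
    have hp : (10:Nat) ^ 1 ≤ 10 ^ k := Nat.pow_le_pow_right (by norm_num) hk.1
    omega
  have hpk : (10:Nat) ^ k = 10 ^ (k - 1) * 10 := by
    conv_lhs => rw [show k = (k - 1) + 1 by omega]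
    ring
  have hp0 : 0 < (10:Nat) ^ (k - 1) := Nat.pow_pos (by norm_num)
  have hklo : 10 ^ (k - 1) ≤ m := by omega
  have hkhi : m < 10 ^ ((k - 1) + 1) := by
    rw [show (k - 1) + 1 = k by omega]; omega
  have hdm : dlen m = k := by
    rw [dlen_char (k - 1) m hklo hkhi]; omega
  have hlog : Nat.log 10 m = k - 1 := by
    have := dlen_eq_log hm1
    omega
  have hceil : (m + 9) / 10 = 10 ^ (k - 1) := by omega
  constructor
  · unfold num_digits
    rw [if_neg (by omega), loop_neg n hn, ← hm, hceil, dlen_pow, hlog]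
    push_cast
    omega
  · rw [alt_eq, ← hm, hdm, hlog]
    omega

-- ===== VERDICT (by name: the statement is the Claim_ definition above) =====
theorem num_digits_spec : Claim_unchanged_num_digits := by
  intro n hDom hnD
  rw [alt_eq]
  rcases lt_trichotomy n 0 with hn | hn | hn
  · -- negative
    unfold num_digits
    rw [if_neg (by omega), loop_neg n hn]
    set m := n.natAbs with hm
    have hm1 : 1 ≤ m := by omega
    by_cases hsm : m < 10
    · exact absurd ⟨hn, 1, by simp, by omega, by omega⟩ hnD
    · rw [Nat.not_lt] at hsm
      have hfl1 : 1 ≤ m / 10 := by omega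
      have hd : dlen m = dlen (m / 10) + 1 := dlen_step hsm
      by_cases hmod : m % 10 = 0
      · have he : (m + 9) / 10 = m / 10 := by omega
        rw [he, hd]
        push_cast; ring
      · have hceil : (m + 9) / 10 = m / 10 + 1 := by omega
        rw [hceil]
        set fl := m / 10 with hfl
        have hmB : m ≤ 2147483648 := by
          unfold Dom_num_digits pvDomInt at hDom
          simp at hDom
          omega
        -- fl + 1 is not a power of 10, else n would lie in D
        have hnpow : ∀ j, j ≤ 10 → fl + 1 ≠ 10 ^ j := by
          intro j hj hcon
          have hj1 : 1 ≤ j := by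
            by_contra hc
            have hz : j = 0 := by omega
            rw [hz] at hcon
            simp at hcon
            omega
          apply hnD
          have hpj : (10:Nat) ^ (j + 1) = 10 ^ j * 10 := by ring
          refine ⟨hn, j + 1, ?_, ?_, ?_⟩
          · simp only [Finset.mem_Icc]
            refine ⟨by omega, ?_⟩
            by_contra hc
            have hge : (10:Nat) ^ 10 ≤ 10 ^ j := Nat.pow_le_pow_right (by norm_num) (by omega)
            have hbig : (10:Nat) ^ 10 = 10000000000 := by norm_num
            omega
          · rw [hpj, ← hcon]; omega
          · rw [hpj, ← hcon]; omega
        -- hence dlen (fl + 1) = dlen fl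
        have hlogfl := dlen_eq_log hfl1
        have hplo : 10 ^ Nat.log 10 fl ≤ fl := Nat.pow_log_le_self 10 (by omega)
        have hphi : fl < 10 ^ (Nat.log 10 fl + 1) := Nat.lt_pow_succ_log_self (by norm_num) fl
        have hup : fl + 1 < 10 ^ (Nat.log 10 fl + 1) := by
          rcases Nat.lt_or_ge (fl + 1) (10 ^ (Nat.log 10 fl + 1)) with h | h
          · exact h
          · exfalso
            have heq : fl + 1 = 10 ^ (Nat.log 10 fl + 1) := by omega
            have hjb : Nat.log 10 fl + 1 ≤ 10 := by
              by_contra hc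
              have hge : (10:Nat) ^ 11 ≤ 10 ^ (Nat.log 10 fl + 1) :=
                Nat.pow_le_pow_right (by norm_num) (by omega)
              have hbig : (10:Nat) ^ 11 = 100000000000 := by norm_num
              omega
            exact hnpow _ hjb heq
        have hd1 : dlen (fl + 1) = Nat.log 10 fl + 1 :=
          dlen_char (Nat.log 10 fl) (fl + 1) (by omega) hup
        rw [hd, hd1, hlogfl]
        push_cast; ring
  · subst hn
    unfold num_digits
    simp [dlen_small (by norm_num : (0:Nat) < 10)]
  · -- positive
    unfold num_digits
    rw [if_neg (by omega)]
    have hm : n = (n.natAbs : Int) := by omega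
    rw [hm, loop_pos n.natAbs (by omega) 0]
    simp [Int.natAbs_abs]

theorem num_digits_changed : Claim_changed_num_digits := by
  unfold Claim_changed_num_digits
  have hD : D_num_digits pvDiffWitness_num_digits := by decide
  obtain ⟨hA, hB⟩ := values_in_D hD
  have hlog : Nat.log 10 (Int.natAbs pvDiffWitness_num_digits) = 0 := by
    simp [pvDiffWitness_num_digits, Nat.log_eq_zero_iff]
  rw [hlog] at hA hB
  exact ⟨by decide, hD, by rw [hA]; decide, by rw [hB]; decide, by decide⟩

theorem num_digits_tight : Claim_exact_num_digits := by
  intro n _ hD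
  obtain ⟨hA, hB⟩ := values_in_D hD
  rw [hA, hB]
  omega
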